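-- pv_equiv track=rewrite | github.com/dw763j/PinTrace | plots/model_display.py | order_model_keys
-- ===== SOURCE A (Python) =====
-- from typing import Iterable
--
-- MODEL_LABEL: dict[str, str] = {
--     "gpt-5.4": "GPT-5.4",
--     "claude-sonnet-4-6": "Claude-Sonnet-4.6",
--     "gemini-3.1-pro-preview": "Gemini-3.1-Pro",
--     "DeepSeek-V3.2": "DeepSeek-V3.2",
--     "kimi-k2.5": "Kimi-K2.5",
--     "Qwen3.5-397B-A17B": "Qwen3.5-397B",
--     "Qwen3-235B-A22B-Instruct-2507": "Qwen3-235B",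
--     "Qwen3-30B-A3B-Instruct-2507": "Qwen3-30B",
--     "MiniMax-M2.5": "MiniMax-M2.5",
--     "meta-llama_llama-4-scout": "Llama-4-Scout",
-- }
--
-- def normalize_model_key(name: str) -> str:
--     return name.strip().lower()
--
-- def order_model_keys(model_keys: Iterable[str]) -> list[str]:
--     """Order keys by MODEL_LABEL insertion order; leftovers are appended alphabetically."""
--     present = {normalize_model_key(k) for k in model_keys}
--     out: list[str] = []
--     for canon in MODEL_LABEL:
--         mk = normalize_model_key(canon)
--         if mk in present:
--             out.append(mk)
--     rest = sorted(present - set(out), key=str.lower)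
--     out.extend(rest)
--     return out
-- ===== SOURCE B (Python) =====
-- # B: build a rank index once, then order the normalized keys with a single sorted() call
-- # (known keys sort by their preset rank, leftovers share rank n and sort alphabetically).
-- MODEL_LABEL: dict[str, str] = {
--     "gpt-5.4": "GPT-5.4",
--     "claude-sonnet-4-6": "Claude-Sonnet-4.6",
--     "gemini-3.1-pro-preview": "Gemini-3.1-Pro",
--     "DeepSeek-V3.2": "DeepSeek-V3.2",
--     "kimi-k2.5": "Kimi-K2.5",
--     "Qwen3.5-397B-A17B": "Qwen3.5-397B",
--     "Qwen3-235B-A22B-Instruct-2507": "Qwen3-235B",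
--     "Qwen3-30B-A3B-Instruct-2507": "Qwen3-30B",
--     "MiniMax-M2.5": "MiniMax-M2.5",
--     "meta-llama_llama-4-scout": "Llama-4-Scout",
-- }
--
-- def normalize_model_key(name: str) -> str:
--     return name.strip().lower()
--
-- _RANK: dict[str, int] = {normalize_model_key(k): i for i, k in enumerate(MODEL_LABEL)}
--
-- def order_model_keys(model_keys):
--     present = {normalize_model_key(k) for k in model_keys}
--     n = len(_RANK)
--     return sorted(present, key=lambda k: (_RANK.get(k, n), k))
-- ===== Notes on version B (the rewrite author's own statement) =====
-- stated objective: simpler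
-- what changed: Replaced the ordered dict-scan that appends present preset keys plus a separate sort of the leftovers by a prebuilt normalized-key rank index and a single sorted() call over the present set with key (rank-or-n, key).
import Mathlib
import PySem

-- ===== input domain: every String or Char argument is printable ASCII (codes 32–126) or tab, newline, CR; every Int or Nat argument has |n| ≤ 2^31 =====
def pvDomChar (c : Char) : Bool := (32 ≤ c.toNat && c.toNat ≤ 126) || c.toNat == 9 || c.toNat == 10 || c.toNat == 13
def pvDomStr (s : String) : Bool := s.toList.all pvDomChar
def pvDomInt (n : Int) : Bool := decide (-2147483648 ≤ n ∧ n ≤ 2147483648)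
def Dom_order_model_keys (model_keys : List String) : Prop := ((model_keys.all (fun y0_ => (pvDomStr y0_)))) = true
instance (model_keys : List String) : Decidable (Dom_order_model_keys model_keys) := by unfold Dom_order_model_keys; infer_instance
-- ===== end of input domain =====

-- B replaces A's dict-scan plus separate leftover sort by a prebuilt rank index and ONE sorted() call (objective: simpler).

-- ===== PORT A =====
def MODEL_LABEL : PySem.Dict String String := PySem.Dict.mk [
  ("gpt-5.4", "GPT-5.4"),
  ("claude-sonnet-4-6", "Claude-Sonnet-4.6"),
  ("gemini-3.1-pro-preview", "Gemini-3.1-Pro"),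
  ("DeepSeek-V3.2", "DeepSeek-V3.2"),
  ("kimi-k2.5", "Kimi-K2.5"),
  ("Qwen3.5-397B-A17B", "Qwen3.5-397B"),
  ("Qwen3-235B-A22B-Instruct-2507", "Qwen3-235B"),
  ("Qwen3-30B-A3B-Instruct-2507", "Qwen3-30B"),
  ("MiniMax-M2.5", "MiniMax-M2.5"),
  ("meta-llama_llama-4-scout", "Llama-4-Scout")]

def normalize_model_key (name : String) : String :=
  PySem.Str.lower (PySem.Str.strip name)

def order_model_keys (model_keys : List String) : List String :=
  let present : PySem.Set String := PySem.Set.ofList (model_keys.map normalize_model_key)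
  let out : List String := MODEL_LABEL.keys.foldl (fun out canon =>
    let mk := normalize_model_key canon
    if PySem.Set.contains present mk then out ++ [mk] else out) []
  let rest : List String :=
    PySem.List.sorted (PySem.Set.diff present (PySem.Set.ofList out)) (fun s => PySem.Str.lower s)
  out ++ rest

-- ===== PORT B =====
-- _RANK = {normalize_model_key(k): i for i, k in enumerate(MODEL_LABEL)}
def RANK : PySem.Dict String Int :=
  (PySem.List.enumerate MODEL_LABEL.keys 0).foldl
    (fun d p => d.insert (normalize_model_key p.2) p.1) PySem.Dict.empty

def order_model_keys_alt (model_keys : List String) : List String :=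
  let present : PySem.Set String := PySem.Set.ofList (model_keys.map normalize_model_key)
  let n : Int := (RANK.size : Int)
  PySem.List.sorted2 present (fun k => RANK.getD k n) (fun k => k)

-- ===== PRECONDITION & SPEC =====
def Spec_order_model_keys (model_keys : List String) (out : List String) : Prop := out = order_model_keys_alt model_keys
instance (model_keys : List String) (out : List String) : Decidable (Spec_order_model_keys model_keys out) := by unfold Spec_order_model_keys; infer_instance

-- ===== CLAIM (what is proved, stated in full; the proofs are below) =====
def Claim_equal_order_model_keys : Prop := ∀ (model_keys : List String), Dom_order_model_keys model_keys → Spec_order_model_keys model_keys (order_model_keys model_keys)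

-- ===== LEMMAS AND PROOFS =====

-- the normalized preset keys, in preset order
def NK : List String := MODEL_LABEL.keys.map normalize_model_key

theorem NK_nodup : NK.Nodup := by decide

theorem RANK_keys : RANK.keys = NK := by decide

theorem rank_lt_of_mem_NK : ∀ m ∈ NK, RANK.getD m 10 < 10 := by decide

theorem rank_pairwise : NK.Pairwise (fun a b => RANK.getD a 10 < RANK.getD b 10) := by decide

theorem rank_of_not_mem_NK {m : String} (h : m ∉ NK) : RANK.getD m 10 = 10 := by
  apply PySem.Dict.getD_of_not_contains
  rw [PySem.Dict.contains_eq_decide_mem_keys, RANK_keys]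
  simpa using h

theorem lowerChar_idem (c : Char) :
    PySem.Chars.lowerChar (PySem.Chars.lowerChar c) = PySem.Chars.lowerChar c := by
  unfold PySem.Chars.lowerChar PySem.Chars.isupper
  by_cases h1 : 'A' ≤ c
  · by_cases h2 : c ≤ 'Z'
    · have hA : 65 ≤ c.toNat := h1
      have hZ : c.toNat ≤ 90 := h2
      simp only [h1, h2, decide_true, Bool.and_self, if_true]
      have hv : (c.toNat + 32).isValidChar := by left; omega
      have ht : (Char.ofNat (c.toNat + 32)).toNat = c.toNat + 32 := by
        rw [Char.toNat_ofNat, if_pos hv]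
      have hnot : ¬ (Char.ofNat (c.toNat + 32) ≤ 'Z') := by
        intro h
        have : (Char.ofNat (c.toNat + 32)).toNat ≤ 90 := h
        omega
      simp [hnot]
    · simp [h2]
  · simp [h1]

theorem lower_lower (s : String) :
    PySem.Str.lower (PySem.Str.lower s) = PySem.Str.lower s := by
  show String.ofList (PySem.Chars.lower (PySem.Str.lower s).toList) = _
  rw [PySem.Str.toList_lower]
  show String.ofList (PySem.Chars.lower (PySem.Chars.lower s.toList)) =
    String.ofList (PySem.Chars.lower s.toList)
  apply congrArg
  unfold PySem.Chars.lower
  rw [List.map_map]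
  apply List.map_congr_left
  intro c _
  exact lowerChar_idem c

theorem filter_map_comm (l : List String) (p : String → Bool) (f : String → String) :
    (l.filter (fun c => p (f c))).map f = (l.map f).filter p := by
  induction l with
  | nil => rfl
  | cons x xs ih => simp only [List.filter_cons, List.map_cons]; by_cases h : p (f x) <;> simp [h, ih]

-- sorted with a (rank, identity) tuple key is sorted with the lexicographic key
theorem sorted2_eq_sorted_toLex (xs : List String) (k1 : String → Int) :
    PySem.List.sorted2 xs k1 (fun k => k) =
      PySem.List.sorted xs (fun k => toLex (k1 k, k)) := by
  rw [PySem.List.sorted_eq_foldl_insertBy]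
  unfold PySem.List.sorted2
  simp only []
  congr 1
  funext acc x
  congr 1
  funext a b
  have hiff : (toLex (k1 a, a) < toLex (k1 b, b)) ↔
      (k1 a < k1 b ∨ (k1 a = k1 b ∧ a < b)) := by
    simp [Prod.Lex.lt_iff]
  rcases lt_trichotomy (k1 a) (k1 b) with h | h | h
  · simp [hiff, h, not_lt_of_gt h]
  · simp [h, Prod.Lex.lt_iff, ← String.lt_iff]
  · simp [hiff, not_lt_of_gt h, h, Int.ne_of_gt h]

-- A's preset-order scan followed by the sorted leftovers IS the single lexicographic sort,
-- for any Nodup list P of lowercase-fixed strings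
theorem core (P : PySem.Set String) (hnd : List.Nodup P)
    (hlow : ∀ m ∈ P, PySem.Str.lower m = m) :
    (NK.filter (fun m => PySem.Set.contains P m)) ++
      PySem.List.sorted
        (PySem.Set.diff P (PySem.Set.ofList (NK.filter (fun m => PySem.Set.contains P m))))
        (fun s => PySem.Str.lower s)
      = PySem.List.sorted P (fun k => toLex (RANK.getD k 10, k)) := by
  set O : List String := NK.filter (fun m => PySem.Set.contains P m) with hO
  set R : List String :=
    PySem.List.sorted (PySem.Set.diff P (PySem.Set.ofList O)) (fun s => PySem.Str.lower s) with hR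
  have hOsub : O.Sublist NK := List.filter_sublist
  have hOnodup : O.Nodup := NK_nodup.sublist hOsub
  have hmemO : ∀ m, m ∈ O ↔ m ∈ NK ∧ m ∈ P := by
    intro m; rw [hO]; simp [List.mem_filter]
  have hmemD : ∀ m, m ∈ PySem.Set.diff P (PySem.Set.ofList O) ↔ m ∈ P ∧ m ∉ O := by
    intro m; rw [PySem.Set.mem_diff, PySem.Set.mem_ofList]
  have hDnodup : (PySem.Set.diff P (PySem.Set.ofList O)).Nodup := PySem.Set.nodup_diff _ _ hnd
  have hRperm : R.Perm (PySem.Set.diff P (PySem.Set.ofList O)) := PySem.List.sorted_perm _ _ _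
  have hmemR : ∀ m, m ∈ R ↔ m ∈ P ∧ m ∉ O := by
    intro m; rw [hR, PySem.List.mem_sorted]; exact hmemD m
  have hRnodup : R.Nodup := hRperm.nodup_iff.mpr hDnodup
  have hRnotNK : ∀ m ∈ R, m ∉ NK := by
    intro m hm hNK
    rcases (hmemR m).mp hm with ⟨hp, hno⟩
    exact hno ((hmemO m).mpr ⟨hNK, hp⟩)
  have hdisj : O.Disjoint R := by
    intro a ha haR
    exact ((hmemR a).mp haR).2 ha
  have happnd : (O ++ R).Nodup := List.Nodup.append hOnodup hRnodup hdisj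
  apply (PySem.List.sorted_eq_of_perm_of_pairwise_lt _ _ _ ?_ ?_).symm
  · -- out ++ rest is a permutation of present
    rw [List.perm_ext_iff_of_nodup happnd hnd]
    intro a
    constructor
    · intro h
      rcases List.mem_append.mp h with h | h
      · exact ((hmemO a).mp h).2
      · exact ((hmemR a).mp h).1
    · intro h
      by_cases hNK : a ∈ NK
      · exact List.mem_append.mpr (Or.inl ((hmemO a).mpr ⟨hNK, h⟩))
      · refine List.mem_append.mpr (Or.inr ((hmemR a).mpr ⟨h, ?_⟩))
        intro hin; exact hNK ((hmemO a).mp hin).1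
  · -- out ++ rest is strictly increasing under the (rank, key) lexicographic key
    rw [List.pairwise_append]
    refine ⟨?_, ?_, ?_⟩
    · refine (rank_pairwise.sublist hOsub).imp ?_
      intro a b h
      rw [Prod.Lex.lt_iff]; simpa using Or.inl h
    · have h1 : R.Pairwise (fun a b => PySem.Str.lower a ≤ PySem.Str.lower b) :=
        PySem.List.sorted_pairwise _ _
      have h2 : R.Pairwise (fun a b : String => a ≠ b) := hRnodup
      refine (h1.and h2).imp_of_mem ?_
      intro a b ha hb hab
      have hpa : a ∈ P := ((hmemR a).mp ha).1
      have hpb : b ∈ P := ((hmemR b).mp hb).1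
      have hle : a ≤ b := by
        have := hab.1; rwa [hlow a hpa, hlow b hpb] at this
      have hlt : a < b := lt_of_le_of_ne hle hab.2
      rw [Prod.Lex.lt_iff]
      simp only [ofLex_toLex]
      right
      exact ⟨by rw [rank_of_not_mem_NK (hRnotNK a ha), rank_of_not_mem_NK (hRnotNK b hb)], hlt⟩
    · intro a ha b hb
      rw [Prod.Lex.lt_iff]
      simp only [ofLex_toLex]
      left
      rw [rank_of_not_mem_NK (hRnotNK b hb)]
      exact rank_lt_of_mem_NK a ((hmemO a).mp ha).1

theorem main_eq (model_keys : List String) :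
    order_model_keys model_keys = order_model_keys_alt model_keys := by
  simp only [order_model_keys, order_model_keys_alt]
  have hsize : ((RANK.size : Nat) : Int) = 10 := by decide
  rw [hsize, sorted2_eq_sorted_toLex]
  rw [PySem.List.foldl_append_if
    (fun c => PySem.Set.contains (PySem.Set.ofList (model_keys.map normalize_model_key)) (normalize_model_key c))
    normalize_model_key]
  rw [List.nil_append, filter_map_comm]
  apply core
  · exact PySem.Set.nodup_ofList _
  · intro m hm
    rcases List.mem_map.mp (by simpa [PySem.Set.mem_ofList] using hm) with ⟨x, _, rfl⟩
    exact lower_lower (PySem.Str.strip x)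

-- ===== VERDICT (by name: the statement is the Claim_ definition above) =====
theorem order_model_keys_spec : Claim_equal_order_model_keys := by
  intro model_keys _
  unfold Spec_order_model_keys
  exact main_eq model_keys
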